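-- pv_equiv track=rewrite | github.com/MITIBMxGraph/SALIENT_plusplus | caching/util.py | batch_sizes
-- ===== SOURCE A (Python) =====
-- def batch_sizes(n_total, n_batch):
--     """Return [b0 b1 ... bk] s.t. bi >= n_batch & sum_i(bi) = n_total."""
--     if n_batch >= n_total:
--         return [n_total]
--     num_batches = n_total // n_batch
--     batches = [n_batch] * num_batches
--     rem = n_total % n_batch
--     inc = rem // num_batches
--     remrem = rem % num_batches
--     for i in range(0, remrem):
--         batches[i] += inc + 1
--     for i in range(remrem, num_batches):
--         batches[i] += inc
--     assert sum(batches) == n_total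
--     return batches
-- ===== SOURCE B (Python) =====
-- def batch_sizes(n_total, n_batch):
--     """Return [b0 b1 ... bk] s.t. bi >= n_batch & sum_i(bi) = n_total."""
--     if n_batch >= n_total:
--         return [n_total]
--     k = n_total // n_batch
--     out = []
--     m = n_total
--     while k > 0:
--         b = -(-m // k)  # ceil(m / k): next batch of a balanced greedy split
--         out.append(b)
--         m -= b
--         k -= 1
--     return out
-- ===== Notes on version B (the rewrite author's own statement) =====
-- stated objective: alternative
-- what changed: Replaced A's three-stage construction (pre-build [n_batch]*k, then two index loops distributing rem//k and rem%k increments in place) by a single greedy peeling loop that emits each batch directly as ceil(remaining/remaining_batches) and subtracts it from the remaining total.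
-- outside the precondition, e.g. on batch_sizes(5, 0): A raises ZeroDivisionError, B raises ZeroDivisionError; on batch_sizes(5, -2): A raises AssertionError, B returns []
import Mathlib
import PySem

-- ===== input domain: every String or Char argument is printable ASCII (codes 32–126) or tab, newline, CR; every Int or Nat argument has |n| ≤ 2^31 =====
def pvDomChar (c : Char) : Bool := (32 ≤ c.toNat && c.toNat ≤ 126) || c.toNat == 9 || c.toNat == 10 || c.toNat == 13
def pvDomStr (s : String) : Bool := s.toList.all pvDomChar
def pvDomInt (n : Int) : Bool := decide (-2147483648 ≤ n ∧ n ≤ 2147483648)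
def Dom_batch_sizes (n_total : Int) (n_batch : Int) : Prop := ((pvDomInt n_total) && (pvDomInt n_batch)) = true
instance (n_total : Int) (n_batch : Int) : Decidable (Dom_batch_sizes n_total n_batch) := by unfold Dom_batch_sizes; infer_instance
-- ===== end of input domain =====

-- B replaces A's pre-built list plus two increment loops by a single greedy loop emitting ceil(remaining/remaining_batches) per batch (alternative decomposition; same values, same order).
-- Pre_ excludes inputs where A raises: n_batch = 0 with n_total > 0 (ZeroDivisionError) and negative n_batch < n_total (AssertionError).


-- ===== PORT A =====
def batch_sizes (n_total : Int) (n_batch : Int) : List Int :=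
  if n_batch ≥ n_total then [n_total]
  else
    let num_batches := PySem.Int.floordiv n_total n_batch
    let batches := List.replicate num_batches.toNat n_batch
    let rem := PySem.Int.mod n_total n_batch
    let inc := PySem.Int.floordiv rem num_batches
    let remrem := PySem.Int.mod rem num_batches
    -- for i in range(0, remrem): batches[i] += inc + 1
    let batches := (PySem.List.pyRange 0 remrem 1).foldl
      (fun bs i => bs.set i.toNat (bs.getD i.toNat 0 + (inc + 1))) batches
    -- for i in range(remrem, num_batches): batches[i] += inc
    let batches := (PySem.List.pyRange remrem num_batches 1).foldl
      (fun bs i => bs.set i.toNat (bs.getD i.toNat 0 + inc)) batches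
    -- assert sum(batches) == n_total  (holds on every input admitted by Pre_)
    batches

-- ===== PORT B =====
-- the 'while k > 0' loop of Source B, recursing on k (a nonnegative Int counted down by 1)
def bsPeel (m : Int) : Nat → List Int
  | 0 => []
  | k + 1 =>
    let b := -(PySem.Int.floordiv (-m) ((k : Int) + 1))  -- -(-m // k): ceil division
    b :: bsPeel (m - b) k

def batch_sizes_alt (n_total : Int) (n_batch : Int) : List Int :=
  if n_batch ≥ n_total then [n_total]
  else
    let k := PySem.Int.floordiv n_total n_batch
    bsPeel n_total k.toNat

-- ===== PRECONDITION & SPEC =====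
-- Pre_ excludes exactly the inputs where Python A raises: n_batch ≤ 0 together with n_batch < n_total
-- (ZeroDivisionError for n_batch = 0, AssertionError for negative n_batch).
def Pre_batch_sizes (n_total : Int) (n_batch : Int) : Prop := n_total ≤ n_batch ∨ 1 ≤ n_batch
instance (n_total : Int) (n_batch : Int) : Decidable (Pre_batch_sizes n_total n_batch) := by unfold Pre_batch_sizes; infer_instance
def pvWitness_batch_sizes : Int × Int := (10, 3)

def Spec_batch_sizes (n_total : Int) (n_batch : Int) (out : List Int) : Prop := out = batch_sizes_alt n_total n_batch
instance (n_total : Int) (n_batch : Int) (out : List Int) : Decidable (Spec_batch_sizes n_total n_batch out) := by unfold Spec_batch_sizes; infer_instance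

-- ===== CLAIM (what is proved, stated in full; the proofs are below) =====
def Claim_equal_batch_sizes : Prop := ∀ (n_total : Int) (n_batch : Int), Dom_batch_sizes n_total n_batch → Pre_batch_sizes n_total n_batch → Spec_batch_sizes n_total n_batch (batch_sizes n_total n_batch)

-- ===== LEMMAS AND PROOFS =====

-- Folding "bs[i] += c" over range(p.length, p.length + d) on p ++ [v]*d ++ s adds c to exactly the middle block.
theorem foldl_incr_block (c v : Int) :
    ∀ (d : Nat) (p s : List Int),
      (PySem.List.pyRange (p.length : Int) ((p.length : Int) + d) 1).foldl
        (fun bs i => bs.set i.toNat (bs.getD i.toNat 0 + c)) (p ++ List.replicate d v ++ s)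
      = p ++ List.replicate d (v + c) ++ s := by
  intro d
  induction d with
  | zero => intro p s; simp [PySem.List.pyRange]
  | succ n ih =>
    intro p s
    rw [PySem.List.pyRange_one_cons (by push_cast; omega)]
    simp only [List.foldl_cons, Int.toNat_natCast]
    have hstep : ((p ++ List.replicate (n+1) v ++ s).set p.length
        ((p ++ List.replicate (n+1) v ++ s).getD p.length 0 + c))
        = (p ++ [v + c]) ++ List.replicate n v ++ s := by
      simp [List.replicate_succ]
    rw [hstep]
    have hl : ((p.length : Int) + 1) = (((p ++ [v+c]).length : Int)) := by simp
    have hl2 : ((p.length : Int) + (n+1 : Nat)) = (((p ++ [v+c]).length : Int) + (n : Nat)) := by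
      simp; ring
    rw [hl2, hl, ih (p ++ [v+c]) s]
    simp [List.replicate_succ]

-- Greedy ceil peeling of m into k parts yields the even split: m%k parts of m/k+1, then (k-m%k) parts of m/k.
theorem bsPeel_eq : ∀ (k : Nat) (m : Int), 1 ≤ k →
    bsPeel m k = List.replicate (m % (k : Int)).toNat (m / (k : Int) + 1)
      ++ List.replicate ((k : Int) - m % (k : Int)).toNat (m / (k : Int)) := by
  intro k
  induction k with
  | zero => intro m h; omega
  | succ n ih =>
    intro m _
    have hkpos : (0 : Int) < (n : Int) + 1 := by positivity
    set q := m / ((n : Int) + 1) with hq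
    set r := m % ((n : Int) + 1) with hr
    have hdm : ((n : Int) + 1) * q + r = m := Int.mul_ediv_add_emod m ((n : Int) + 1)
    have hr0 : 0 ≤ r := Int.emod_nonneg m (by omega)
    have hrlt : r < (n : Int) + 1 := Int.emod_lt_of_pos m hkpos
    have hb : -(PySem.Int.floordiv (-m) ((n : Int) + 1)) = if r = 0 then q else q + 1 := by
      rw [PySem.Int.floordiv_eq_ediv_of_pos hkpos]
      by_cases h0 : r = 0
      · rw [if_pos h0]
        have : (-m) / ((n : Int) + 1) = -q ∧ (-m) % ((n : Int) + 1) = 0 :=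
          (Int.ediv_emod_unique hkpos).mpr ⟨by linear_combination -hdm + h0, le_refl 0, hkpos⟩
        omega
      · rw [if_neg h0]
        have : (-m) / ((n : Int) + 1) = -q - 1 ∧ (-m) % ((n : Int) + 1) = (n : Int) + 1 - r :=
          (Int.ediv_emod_unique hkpos).mpr ⟨by linear_combination -hdm, by omega, by omega⟩
        omega
    show (-(PySem.Int.floordiv (-m) ((n : Int) + 1))) ::
        bsPeel (m - -(PySem.Int.floordiv (-m) ((n : Int) + 1))) n = _
    rw [hb]
    have hcast : ((n + 1 : Nat) : Int) = (n : Int) + 1 := by push_cast; ring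
    rw [hcast, ← hq, ← hr]
    by_cases h0 : r = 0
    · rw [if_pos h0]
      rcases Nat.eq_zero_or_pos n with hn | hn
      · subst hn
        simp only [bsPeel]
        have h1 : r.toNat = 0 := by omega
        have h2 : (((0 : Nat) : Int) + 1 - r).toNat = 1 := by omega
        rw [h1, h2]
        rfl
      · have hnpos : (0 : Int) < (n : Int) := by exact_mod_cast hn
        have hqr' : (m - q) / (n : Int) = q ∧ (m - q) % (n : Int) = 0 :=
          (Int.ediv_emod_unique hnpos).mpr ⟨by linear_combination hdm - h0, le_refl 0, hnpos⟩
        rw [ih (m - q) hn, hqr'.1, hqr'.2]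
        have h1 : r.toNat = 0 := by omega
        have h2 : ((0 : Int)).toNat = 0 := rfl
        have h3 : ((n : Int) - 0).toNat = n := by omega
        have h4 : ((n : Int) + 1 - r).toNat = n + 1 := by omega
        rw [h1, h2, h3, h4]
        simp [List.replicate_succ]
    · rw [if_neg h0]
      have hnpos : (0 : Int) < (n : Int) := by omega
      have hn1 : 1 ≤ n := by omega
      have hqr' : (m - (q + 1)) / (n : Int) = q ∧ (m - (q + 1)) % (n : Int) = r - 1 :=
        (Int.ediv_emod_unique hnpos).mpr ⟨by linear_combination hdm, by omega, by omega⟩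
      rw [ih (m - (q + 1)) hn1, hqr'.1, hqr'.2]
      have h1 : r.toNat = (r - 1).toNat + 1 := by omega
      have h2 : ((n : Int) - (r - 1)).toNat = ((n : Int) + 1 - r).toNat := by omega
      rw [h1, h2]
      simp [List.replicate_succ]

theorem batch_sizes_eq (n_total n_batch : Int) (h1 : 1 ≤ n_batch) (h2 : n_batch < n_total) :
    batch_sizes n_total n_batch = batch_sizes_alt n_total n_batch := by
  have hb : 0 < n_batch := by omega
  have hge : ¬ n_batch ≥ n_total := by omega
  set nb := PySem.Int.floordiv n_total n_batch with hnbdef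
  have hnb1 : 1 ≤ nb := by
    rw [hnbdef, PySem.Int.le_floordiv_iff_mul_le hb]; omega
  have hnbpos : 0 < nb := by omega
  set rem := PySem.Int.mod n_total n_batch with hremdef
  set inc := PySem.Int.floordiv rem nb with hincdef
  set rr := PySem.Int.mod rem nb with hrrdef
  have hrr0 : 0 ≤ rr := PySem.Int.mod_nonneg rem hnbpos
  have hrrlt : rr < nb := PySem.Int.mod_lt rem hnbpos
  have e1 : nb * n_batch + rem = n_total := PySem.Int.floordiv_mul_add_mod n_total n_batch
  have e2 : inc * nb + rr = rem := PySem.Int.floordiv_mul_add_mod rem nb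
  -- q and r of the even split over nb batches
  have hqr : n_total / nb = n_batch + inc ∧ n_total % nb = rr :=
    (Int.ediv_emod_unique hnbpos).mpr ⟨by linear_combination e1 + e2, hrr0, hrrlt⟩
  -- cast bookkeeping
  have hrrcast : rr = ((rr.toNat : Nat) : Int) := by omega
  have hnbcast : nb = ((rr.toNat : Nat) : Int) + ((nb.toNat - rr.toNat : Nat) : Int) := by omega
  have hsplit : List.replicate nb.toNat n_batch
      = List.replicate rr.toNat n_batch ++ List.replicate (nb.toNat - rr.toNat) n_batch := by
    rw [← List.replicate_add]; congr 1; omega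
  show (if n_batch ≥ n_total then [n_total] else _) = (if n_batch ≥ n_total then [n_total] else _)
  rw [if_neg hge, if_neg hge]
  simp only [← hnbdef, ← hremdef, ← hincdef, ← hrrdef]
  -- first loop
  have L1 := foldl_incr_block (inc + 1) n_batch rr.toNat ([] : List Int)
      (List.replicate (nb.toNat - rr.toNat) n_batch)
  simp only [List.length_nil, Nat.cast_zero, List.nil_append, zero_add] at L1
  rw [← hrrcast] at L1
  rw [hsplit, L1]
  -- second loop
  have L2 := foldl_incr_block inc n_batch (nb.toNat - rr.toNat)
      (List.replicate rr.toNat (n_batch + (inc + 1))) ([] : List Int)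
  simp only [List.length_replicate, List.append_nil] at L2
  rw [show ((rr.toNat : Nat) : Int) + ((nb.toNat - rr.toNat : Nat) : Int) = nb from hnbcast.symm, ← hrrcast] at L2
  rw [L2]
  -- B side: peel nb batches greedily
  have hB := bsPeel_eq nb.toNat n_total (by omega)
  rw [show ((nb.toNat : Nat) : Int) = nb by omega, hqr.1, hqr.2] at hB
  rw [hB]
  have h3 : n_batch + (inc + 1) = n_batch + inc + 1 := by ring
  have h4 : nb.toNat - rr.toNat = (nb - rr).toNat := by omega
  rw [h3, h4]

-- ===== VERDICT (by name: the statement is the Claim_ definition above) =====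
theorem batch_sizes_spec : Claim_equal_batch_sizes := by
  intro t b _ hpre
  unfold Spec_batch_sizes
  by_cases hge : b ≥ t
  · simp [batch_sizes, batch_sizes_alt, hge]
  · exact batch_sizes_eq t b (by unfold Pre_batch_sizes at hpre; omega) (by omega)
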